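-- pv_equiv track=rewrite | github.com/rogersstuart/EmbeddedUIPresetGenerator | AudioClassification.py | parse_user_prompt
-- ===== SOURCE A (Python) =====
-- def get_categories():
--     """Return list of category names in order"""
--     return [
--         "Type", "Noise", "Instrument", "Synth", "Tone Quality",
--         "Pitch Level", "Volume Intensity", "Time Shape", "Sound Texture",
--         "Emotional Feel", "More Emotion", "Sound Source", "Genre Style",
--         "Spatial Sense", "Motion Character", "Clarity Quality", "Rhythmic Flow"
--     ]
--
-- def parse_user_prompt(prompt: str) -> str:
--     """Convert user prompt to comma-separated category values"""
--     categories = get_categories()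
--     words = prompt.split()
--     result = []
--
--     # Map words to categories or use defaults
--     for cat in categories:
--         if len(words) > 0:
--             result.append(words.pop(0))
--         else:
--             result.append("neutral")  # Default value
--
--     return ",".join(result)
-- ===== SOURCE B (Python) =====
-- def get_categories():
--     """Return list of category names in order"""
--     return [
--         "Type", "Noise", "Instrument", "Synth", "Tone Quality",
--         "Pitch Level", "Volume Intensity", "Time Shape", "Sound Texture",
--         "Emotional Feel", "More Emotion", "Sound Source", "Genre Style",
--         "Spatial Sense", "Motion Character", "Clarity Quality", "Rhythmic Flow"
--     ]
--
-- def parse_user_prompt(prompt: str) -> str: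
--     """Convert user prompt to comma-separated category values"""
--     n = len(get_categories())
--     words = prompt.split()[:n]
--     words += ["neutral"] * (n - len(words))
--     return ",".join(words)
-- ===== Notes on version B (the rewrite author's own statement) =====
-- stated objective: simpler
-- what changed: Replaced the per-category loop with its pop(0) mutation by a single slice-to-n plus list-multiplication padding and one join; only the category count is used.
import Mathlib
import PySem

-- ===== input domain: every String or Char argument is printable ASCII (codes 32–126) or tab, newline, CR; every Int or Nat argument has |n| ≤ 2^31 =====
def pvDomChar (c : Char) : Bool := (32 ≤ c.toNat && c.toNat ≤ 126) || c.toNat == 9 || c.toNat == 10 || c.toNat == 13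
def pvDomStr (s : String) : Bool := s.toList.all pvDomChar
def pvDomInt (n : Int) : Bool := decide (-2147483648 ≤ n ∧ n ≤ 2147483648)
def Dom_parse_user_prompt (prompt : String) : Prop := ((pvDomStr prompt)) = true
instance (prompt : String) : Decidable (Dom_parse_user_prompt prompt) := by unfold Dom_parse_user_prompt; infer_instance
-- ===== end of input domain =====

-- B replaces A's per-category loop with pop(0) by slice-to-n plus replicate padding and one join (simpler; return value only).

-- ===== PORT A =====
def get_categories : List String :=
  ["Type", "Noise", "Instrument", "Synth", "Tone Quality",
   "Pitch Level", "Volume Intensity", "Time Shape", "Sound Texture",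
   "Emotional Feel", "More Emotion", "Sound Source", "Genre Style",
   "Spatial Sense", "Motion Character", "Clarity Quality", "Rhythmic Flow"]

-- the loop body: pop the first remaining word, else append "neutral"
def parseStep (s : List String × List String) (_cat : String) : List String × List String :=
  match s.1 with
  | w :: rest => (rest, s.2 ++ [w])
  | [] => ([], s.2 ++ ["neutral"])

def parse_user_prompt (prompt : String) : String :=
  let categories := get_categories
  let words := PySem.Str.split₀ prompt
  let result := (categories.foldl parseStep (words, [])).2
  PySem.Str.join "," result

-- ===== PORT B =====
def parse_user_prompt_alt (prompt : String) : String :=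
  let n := get_categories.length
  let words := (PySem.Str.split₀ prompt).take n
  let padded := words ++ List.replicate (n - words.length) "neutral"
  PySem.Str.join "," padded

-- ===== PRECONDITION & SPEC =====
def Spec_parse_user_prompt (prompt : String) (out : String) : Prop := out = parse_user_prompt_alt prompt
instance (prompt : String) (out : String) : Decidable (Spec_parse_user_prompt prompt out) := by unfold Spec_parse_user_prompt; infer_instance

-- ===== CLAIM (what is proved, stated in full; the proofs are below) =====
def Claim_equal_parse_user_prompt : Prop := ∀ (prompt : String), Dom_parse_user_prompt prompt → Spec_parse_user_prompt prompt (parse_user_prompt prompt)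

-- ===== LEMMAS AND PROOFS =====
theorem foldl_parseStep (cats : List String) : ∀ (ws acc : List String),
    (cats.foldl parseStep (ws, acc)).2
      = acc ++ ws.take cats.length ++ List.replicate (cats.length - ws.length) "neutral" := by
  induction cats with
  | nil => intro ws acc; simp
  | cons c cs ih =>
    intro ws acc
    cases ws with
    | nil => simp [List.foldl, parseStep, ih, List.replicate_succ]
    | cons w rest => simp [List.foldl, parseStep, ih, List.append_assoc]

-- ===== VERDICT (by name: the statement is the Claim_ definition above) =====
theorem parse_user_prompt_spec : Claim_equal_parse_user_prompt := by
  intro prompt _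
  unfold Spec_parse_user_prompt parse_user_prompt parse_user_prompt_alt
  simp only [foldl_parseStep, List.nil_append]
  rcases Nat.le_total (PySem.Str.split₀ prompt).length get_categories.length with hle | hge
  · rw [List.take_of_length_le hle]
  · rw [List.length_take, Nat.min_eq_left hge, Nat.sub_self,
        Nat.sub_eq_zero_of_le hge]
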